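-- pv_equiv track=rewrite | github.com/Korkuttum/localtuya_ir_climate | custom_components/localtuya_ir_climate/climate_protocols/midea.py | _encode_coolix_compatible
-- ===== SOURCE A (Python) =====
-- def _encode_coolix_compatible(data):
--     """
--     Alternative encoding for Coolix compatibility.
--     Midea devices can also understand Coolix protocol.
--     """
--     # This is a simplified version - actual Coolix encoding is more complex
--     pulses = []
--
--     # Coolix header
--     pulses.extend([4500, 4500])  # Header mark/space
--
--     # Data (34 bits total for Coolix)
--     # Simplified implementation
--     for byte in data:
--         for i in range(8):
--             pulses.append(560)  # Bit mark
--             if byte & (1 << i):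
--                 pulses.append(1690)  # 1 space
--             else:
--                 pulses.append(560)   # 0 space
--
--     pulses.append(560)  # Final mark
--
--     return pulses
-- ===== SOURCE B (Python) =====
-- # Table-driven re-implementation: per-byte pulse patterns precomputed once at import time.
-- BYTE_PULSES = [
--     [p for i in range(8) for p in ((560, 1690) if (v >> i) & 1 == 1 else (560, 560))]
--     for v in range(256)
-- ]
--
--
-- def _encode_coolix_compatible(data):
--     """
--     Alternative encoding for Coolix compatibility.
--     Midea devices can also understand Coolix protocol.
--     """
--     return [4500, 4500] + [p for b in data for p in BYTE_PULSES[b & 0xFF]] + [560]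
-- ===== Notes on version B (the rewrite author's own statement) =====
-- stated objective: alternative
-- what changed: Replaces the per-byte inner bit loop with a module-level 256-entry table of precomputed 16-pulse patterns, indexed by the byte's low 8 bits and flattened over the input in one pass.
import Mathlib
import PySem

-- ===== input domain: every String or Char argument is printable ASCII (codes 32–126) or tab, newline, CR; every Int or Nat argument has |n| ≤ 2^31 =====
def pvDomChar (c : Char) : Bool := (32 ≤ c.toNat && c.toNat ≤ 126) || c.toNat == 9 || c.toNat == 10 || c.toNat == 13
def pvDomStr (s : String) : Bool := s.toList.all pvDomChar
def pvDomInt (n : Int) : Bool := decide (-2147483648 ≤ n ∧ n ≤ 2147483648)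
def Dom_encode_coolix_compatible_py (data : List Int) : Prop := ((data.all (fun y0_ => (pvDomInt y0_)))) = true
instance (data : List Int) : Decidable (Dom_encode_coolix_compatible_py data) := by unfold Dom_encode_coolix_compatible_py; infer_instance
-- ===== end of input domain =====

-- B replaces A's per-bit inner loop by a 256-entry per-byte pulse table built once
-- at import time and flattened over the input (alternative decomposition; not claimed faster).

-- ===== PORT A =====
-- literal port of A: foldl over data, inner foldl over range(8);
-- 'byte & (1 << i)' is PySem.Int.band with shift 1 <<< i.toNat (i ∈ [0,8), so toNat is exact).
def encode_coolix_compatible_py (data : List Int) : List Int :=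
  let pulses : List Int := []
  let pulses := pulses ++ [4500, 4500]
  let pulses := data.foldl (fun pulses byte =>
    (PySem.List.pyRange 0 8 1).foldl (fun pulses i =>
      let pulses := pulses ++ [560]
      if PySem.Int.band byte ((1 : Int) <<< i.toNat) ≠ 0 then pulses ++ [1690]
      else pulses ++ [560]) pulses) pulses
  pulses ++ [560]

-- ===== PORT B =====
-- module-level table BYTE_PULSES of Source B
def pvBytePulses : List (List Int) :=
  (List.range 256).map (fun v =>
    (List.range 8).flatMap (fun i =>
      [560, if (v >>> i) &&& 1 = 1 then 1690 else 560]))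

-- b & 0xFF is always in [0, 255], so the Python index never raises; getD is exact here.
def encode_coolix_compatible_py_alt (data : List Int) : List Int :=
  [4500, 4500] ++ data.flatMap (fun b => pvBytePulses.getD (PySem.Int.band b 255).toNat []) ++ [560]

-- ===== PRECONDITION & SPEC =====
def Spec_encode_coolix_compatible_py (data : List Int) (out : List Int) : Prop := out = encode_coolix_compatible_py_alt data
instance (data : List Int) (out : List Int) : Decidable (Spec_encode_coolix_compatible_py data out) := by unfold Spec_encode_coolix_compatible_py; infer_instance

-- ===== CLAIM (what is proved, stated in full; the proofs are below) =====
def Claim_equal_encode_coolix_compatible_py : Prop := ∀ (data : List Int), Dom_encode_coolix_compatible_py data → Spec_encode_coolix_compatible_py data (encode_coolix_compatible_py data)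

-- ===== LEMMAS AND PROOFS =====

lemma band255_lt (b : Int) : (PySem.Int.band b 255).toNat < 256 := by
  unfold PySem.Int.band
  simp only [show (255:Int).toNat = 255 from rfl, show (0:Int) ≤ 255 from by norm_num, if_true]
  split_ifs with h
  · have : b.toNat &&& 255 ≤ 255 := Nat.and_le_right
    omega
  · omega

set_option maxRecDepth 4096 in
lemma comp_testBit : ∀ r < 256, ∀ i < 8, (255 - r).testBit i = !(r.testBit i) := by decide

lemma key (b : Int) (i : Nat) (hi : i < 8) :
    (PySem.Int.band b ((1 : Int) <<< ((i : Nat) : Int)) ≠ 0) ↔ (PySem.Int.band b 255).toNat.testBit i := by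
  have hpow : ((1 : Int) <<< ((i : Nat) : Int)) = ((2 ^ i : Nat) : Int) := by
    rw [show (1 : Int) = ((1 : Nat) : Int) from rfl, Int.shiftLeft_natCast, Nat.one_shiftLeft]
  rw [hpow]
  unfold PySem.Int.band
  have h2 : (0 : Int) ≤ ((2 ^ i : Nat) : Int) := by positivity
  have hp : 0 < 2 ^ i := Nat.two_pow_pos i
  by_cases hb : 0 ≤ b
  · simp only [hb, if_true, h2, show (0:Int) ≤ 255 from by norm_num, Int.toNat_natCast,
      show (255:Int).toNat = 255 from rfl]
    rw [Nat.and_two_pow, show (255:Nat) = 2^8 - 1 from rfl, Nat.and_two_pow_sub_one_eq_mod,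
      Nat.testBit_mod_two_pow]
    rcases h : b.toNat.testBit i <;> simp [h, hi]
  · simp only [hb, if_false, h2, show (0:Int) ≤ 255 from by norm_num, if_true, Int.toNat_natCast,
      show (255:Int).toNat = 255 from rfl]
    set k := (-b - 1).toNat with hk
    rw [Nat.and_comm (2 ^ i) k, Nat.and_two_pow, Nat.and_comm 255 k,
      show (255:Nat) = 2^8 - 1 from rfl, Nat.and_two_pow_sub_one_eq_mod]
    have hlt : k % 2^8 < 256 := Nat.mod_lt _ (by norm_num)
    rw [show ((2:Nat)^8 - 1) = 255 from rfl, comp_testBit (k % 2^8) hlt i hi,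
      Nat.testBit_mod_two_pow]
    rcases h : k.testBit i <;> simp [h, hi]

lemma table_get (v : Nat) (hv : v < 256) :
    pvBytePulses.getD v [] =
      (List.range 8).flatMap (fun i =>
        [560, if (v >>> i) &&& 1 = 1 then 1690 else 560]) := by
  unfold pvBytePulses
  rw [List.getD_eq_getElem _ _ (by simpa using hv)]
  simp

lemma shift_and_one (v i : Nat) : ((v >>> i) &&& 1 = 1) ↔ v.testBit i := by
  rw [Nat.testBit, Nat.and_comm 1 (v >>> i)]
  simp [Nat.and_one_is_mod]

set_option maxRecDepth 4096 in
lemma pyRange8 : PySem.List.pyRange 0 8 1 = [0, 1, 2, 3, 4, 5, 6, 7] := by decide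

lemma fold_flat (b : Int) : ∀ (l : List Int) (acc : List Int),
    l.foldl (fun pulses i =>
        let pulses := pulses ++ [560]
        if PySem.Int.band b ((1 : Int) <<< i.toNat) ≠ 0 then pulses ++ [1690]
        else pulses ++ [560]) acc
      = acc ++ l.flatMap (fun i =>
          [560, if PySem.Int.band b ((1 : Int) <<< i.toNat) ≠ 0 then 1690 else 560]) := by
  intro l
  induction l with
  | nil => simp
  | cons x xs ih =>
    intro acc
    simp only [List.foldl_cons, List.flatMap_cons, ih]
    split_ifs <;> simp

lemma innerA (b : Int) (acc : List Int) :
    (PySem.List.pyRange 0 8 1).foldl (fun pulses i =>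
        let pulses := pulses ++ [560]
        if PySem.Int.band b ((1 : Int) <<< i.toNat) ≠ 0 then pulses ++ [1690]
        else pulses ++ [560]) acc
      = acc ++ pvBytePulses.getD (PySem.Int.band b 255).toNat [] := by
  rw [pyRange8, fold_flat, table_get _ (band255_lt b)]
  set v := (PySem.Int.band b 255).toNat with hv
  have c : ∀ i : Nat, i < 8 →
      (PySem.Int.band b ((1 : Int) <<< ((i : Nat) : Int)) ≠ 0) = ((v >>> i) &&& 1 = 1) := by
    intro i hi
    exact propext ((key b i hi).trans (shift_and_one v i).symm)
  congr 1
  rw [show ([0,1,2,3,4,5,6,7] : List Int) = (List.range 8).map (fun n : Nat => (n : Int))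
        from by decide]
  rw [List.flatMap_map]
  apply List.flatMap_congr
  intro n hn
  have hn8 : n < 8 := by simpa using hn
  simp only [Int.toNat_natCast]
  simp only [c n hn8]

lemma outerA (data : List Int) (acc : List Int) :
    data.foldl (fun pulses byte =>
      (PySem.List.pyRange 0 8 1).foldl (fun pulses i =>
        let pulses := pulses ++ [560]
        if PySem.Int.band byte ((1 : Int) <<< i.toNat) ≠ 0 then pulses ++ [1690]
        else pulses ++ [560]) pulses) acc
      = acc ++ data.flatMap (fun b => pvBytePulses.getD (PySem.Int.band b 255).toNat []) := by
  induction data generalizing acc with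
  | nil => simp
  | cons x xs ih => rw [List.foldl_cons, innerA, ih]; simp [List.append_assoc]

-- ===== VERDICT (by name: the statement is the Claim_ definition above) =====
theorem encode_coolix_compatible_py_spec : Claim_equal_encode_coolix_compatible_py := by
  intro data _
  unfold Spec_encode_coolix_compatible_py encode_coolix_compatible_py encode_coolix_compatible_py_alt
  dsimp only
  rw [outerA]
  simp
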